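-- pv_equiv track=rewrite | github.com/steveyx/VehicleRouting | VR.py | getStartEndIndex
-- ===== SOURCE A (Python) =====
-- def getStartEndIndex(a,m_num):
--     nodes = len(a)
--     tot = m_num[0]
--     start = [0]
--     end = [m_num[0]]
--     for i in range(1,len(m_num)-1):
--         start.append(tot)
--         tot = tot + m_num[i]
--         end.append(tot)
--     start.append(tot)
--     end.append(nodes)
--     return start,end
-- ===== SOURCE B (Python) =====
-- def getStartEndIndex(a, m_num):
--     # cumulative-sum table C[k] = sum(m_num[:k]), then slice it
--     c = [0]
--     for x in m_num:
--         c.append(c[-1] + x)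
--     start = c[:-1]
--     end = c[1:-1] + [len(a)]
--     return start, end
-- ===== Notes on version B (the rewrite author's own statement) =====
-- stated objective: alternative
-- what changed: Replaces A's fused running-sum loop with three appends per step by a table-then-slice decomposition: build the cumulative-sum table C once, then start = C[:-1] and end = C[1:-1] + [len(a)].
-- intended difference: When len(m_num) == 1, A returns two segments ([0, m_num[0]], [m_num[0], len(a)]) even though there is only one vehicle; B returns the single full segment ([0], [len(a)]), which is the intended partition for one vehicle. — e.g. on getStartEndIndex([1, 2, 3], [2]): A returns ([0, 2], [2, 3]), B returns ([0], [3])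
import Mathlib
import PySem

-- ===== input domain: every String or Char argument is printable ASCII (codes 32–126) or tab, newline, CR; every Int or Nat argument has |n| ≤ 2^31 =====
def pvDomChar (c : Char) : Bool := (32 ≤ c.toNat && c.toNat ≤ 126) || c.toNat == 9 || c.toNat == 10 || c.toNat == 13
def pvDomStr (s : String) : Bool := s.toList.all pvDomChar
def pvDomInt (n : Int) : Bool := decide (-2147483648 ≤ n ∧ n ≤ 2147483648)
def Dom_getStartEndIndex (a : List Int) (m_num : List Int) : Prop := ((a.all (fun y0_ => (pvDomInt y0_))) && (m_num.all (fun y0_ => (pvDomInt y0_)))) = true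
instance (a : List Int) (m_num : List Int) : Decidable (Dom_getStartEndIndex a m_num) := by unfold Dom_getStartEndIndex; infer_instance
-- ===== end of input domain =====

-- B replaces A's fused running-sum loop by a cumulative-sum table that is then sliced
-- (same O(n) cost, different decomposition); on len(m_num) == 1 B returns the intended
-- single full segment where A returns two (see D_ below).

-- ===== PORT A =====
-- Literal port of A: tot/start/end threaded through the for-i-in-range(1, len(m_num)-1) loop.
def getStartEndIndex (a : List Int) (m_num : List Int) : List Int × List Int :=
  let nodes : Int := a.length
  let tot : Int := PySem.List.pyGetD m_num 0 0      -- m_num[0]; Pre_ excludes m_num = []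
  let start : List Int := [0]
  let «end» : List Int := [tot]
  let r := (PySem.List.pyRange 1 ((m_num.length : Int) - 1) 1).foldl
      (fun (st : Int × List Int × List Int) i =>
        (st.1 + PySem.List.pyGetD m_num i 0,
         st.2.1 ++ [st.1],
         st.2.2 ++ [st.1 + PySem.List.pyGetD m_num i 0]))
      (tot, start, «end»)
  (r.2.1 ++ [r.1], r.2.2 ++ [nodes])

-- ===== PORT B =====
-- Literal port of Source B: build the cumulative table c (appending c[-1] + x), then slice.
def getStartEndIndex_alt (a : List Int) (m_num : List Int) : List Int × List Int :=
  let c : List Int := m_num.foldl (fun c x => c ++ [PySem.List.pyGetD c (-1) 0 + x]) [0]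
  let start := PySem.List.slice c none (some (-1))            -- c[:-1]
  let «end» := PySem.List.slice c (some 1) (some (-1)) ++ [(a.length : Int)]  -- c[1:-1] + [len(a)]
  (start, «end»)

-- ===== PRECONDITION & SPEC =====
-- Pre_ excludes only m_num = [], on which the Python A raises IndexError (m_num[0]).
def Pre_getStartEndIndex (a : List Int) (m_num : List Int) : Prop := m_num ≠ []
instance (a : List Int) (m_num : List Int) : Decidable (Pre_getStartEndIndex a m_num) := by unfold Pre_getStartEndIndex; infer_instance
def pvWitness_getStartEndIndex : List Int × List Int := ([5, 6, 7], [1, 2])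

-- When len(m_num) == 1, A returns two segments ([0, m_num[0]], [m_num[0], len(a)]) even
-- though there is only one vehicle; B returns the single full segment ([0], [len(a)]),
-- the intended partition for one vehicle.
def D_getStartEndIndex (a : List Int) (m_num : List Int) : Prop := m_num.length = 1
instance (a : List Int) (m_num : List Int) : Decidable (D_getStartEndIndex a m_num) := by unfold D_getStartEndIndex; infer_instance
def Spec_getStartEndIndex (a : List Int) (m_num : List Int) (out : List Int × List Int) : Prop := ¬ D_getStartEndIndex a m_num → out = getStartEndIndex_alt a m_num
instance (a : List Int) (m_num : List Int) (out : List Int × List Int) : Decidable (Spec_getStartEndIndex a m_num out) := by unfold Spec_getStartEndIndex; infer_instance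
def pvDiffWitness_getStartEndIndex : List Int × List Int := ([1, 2, 3], [2])
def pvDiffWitnessOut_getStartEndIndex : (List Int × List Int) × (List Int × List Int) :=
  (([0, 2], [2, 3]), ([0], [3]))

-- ===== CLAIM (what is proved, stated in full; the proofs are below) =====
def Claim_unchanged_getStartEndIndex : Prop := ∀ (a : List Int) (m_num : List Int), Dom_getStartEndIndex a m_num → Pre_getStartEndIndex a m_num → Spec_getStartEndIndex a m_num (getStartEndIndex a m_num)
def Claim_changed_getStartEndIndex : Prop := Dom_getStartEndIndex (pvDiffWitness_getStartEndIndex.1) (pvDiffWitness_getStartEndIndex.2) ∧ Pre_getStartEndIndex (pvDiffWitness_getStartEndIndex.1) (pvDiffWitness_getStartEndIndex.2) ∧ D_getStartEndIndex (pvDiffWitness_getStartEndIndex.1) (pvDiffWitness_getStartEndIndex.2) ∧ getStartEndIndex (pvDiffWitness_getStartEndIndex.1) (pvDiffWitness_getStartEndIndex.2) = pvDiffWitnessOut_getStartEndIndex.1 ∧ getStartEndIndex_alt (pvDiffWitness_getStartEndIndex.1) (pvDiffWitness_getStartEndIndex.2) = pvDiffWitnessOut_getStartEndIndex.2 ∧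 pvDiffWitnessOut_getStartEndIndex.1 ≠ pvDiffWitnessOut_getStartEndIndex.2
def Claim_exact_getStartEndIndex : Prop := ∀ (a : List Int) (m_num : List Int), Dom_getStartEndIndex a m_num → Pre_getStartEndIndex a m_num → D_getStartEndIndex a m_num → getStartEndIndex a m_num ≠ getStartEndIndex_alt a m_num

-- ===== LEMMAS AND PROOFS =====

/-- Cumulative-sum table: `cumF t l = [t, t+l₀, t+l₀+l₁, …, t+l.sum]`. -/
def cumF (t : Int) : List Int → List Int
  | [] => [t]
  | y :: ys => t :: cumF (t + y) ys

theorem cumF_ne_nil (t : Int) (l : List Int) : cumF t l ≠ [] := by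
  cases l <;> simp [cumF]

theorem cumF_head (t : Int) (l : List Int) : cumF t l = t :: (cumF t l).tail := by
  cases l <;> simp [cumF]

theorem cumF_append_singleton (t : Int) (l : List Int) (z : Int) :
    cumF t (l ++ [z]) = cumF t l ++ [t + l.sum + z] := by
  induction l generalizing t with
  | nil => simp [cumF]
  | cons y ys ih => simp [cumF, ih (t + y)]; ring_nf

theorem cumF_eq_dropLast_append (t : Int) (l : List Int) :
    cumF t l = (cumF t l).dropLast ++ [t + l.sum] := by
  induction l generalizing t with
  | nil => simp [cumF]
  | cons y ys ih =>
    simp [cumF]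
    rw [List.dropLast_cons_of_ne_nil (cumF_ne_nil _ _)]
    rw [ih (t + y)]
    simp; ring_nf

/-- B's table-building fold computes `cumF`. -/
theorem b_fold_eq_cumF (l : List Int) (p : List Int) (t : Int) :
    l.foldl (fun c x => c ++ [PySem.List.pyGetD c (-1) 0 + x]) (p ++ [t]) = p ++ cumF t l := by
  induction l generalizing p t with
  | nil => simp [cumF]
  | cons y ys ih =>
    simp only [List.foldl_cons, PySem.List.pyGetD_neg_one_append_singleton]
    rw [ih (p ++ [t]) (t + y)]
    simp [cumF]

/-- A's loop over a middle list: appends `(cumF t mid).dropLast` to start,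
    `(cumF t mid).tail` to end, final tot is `t + mid.sum`. -/
theorem a_fold_spec (mid : List Int) (t : Int) (s e : List Int) :
    mid.foldl (fun (st : Int × List Int × List Int) x =>
        (st.1 + x, st.2.1 ++ [st.1], st.2.2 ++ [st.1 + x])) (t, s, e)
      = (t + mid.sum, s ++ (cumF t mid).dropLast, e ++ (cumF t mid).tail) := by
  induction mid generalizing t s e with
  | nil => simp [cumF]
  | cons y ys ih =>
    simp only [List.foldl_cons, ih (t + y)]
    rw [cumF]
    rw [List.dropLast_cons_of_ne_nil (cumF_ne_nil _ _)]
    simp only [Prod.mk.injEq, List.cons_append, List.append_assoc, List.nil_append,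
      List.sum_cons, List.tail_cons]
    refine ⟨by ring, trivial, ?_⟩
    rw [← cumF_head]

theorem slice_one_neg_one {α : Type} (xs : List α) :
    PySem.List.slice xs (some 1) (some (-1)) = xs.tail.dropLast := by
  cases xs with
  | nil => rfl
  | cons x l =>
    simp [PySem.List.slice, PySem.List.clampIdx, List.dropLast_eq_take]
    rw [if_neg (by omega : ¬ ((l.length : Int) < 0))]
    omega

theorem pyGetD_dropLast (m : List Int) (i : Int) (h0 : 0 ≤ i)
    (h1 : i < (m.dropLast.length : Int)) :
    PySem.List.pyGetD m i 0 = PySem.List.pyGetD m.dropLast i 0 := by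
  have hlt : i.toNat < m.dropLast.length := by omega
  have hlt' : i.toNat < m.length := by simp at hlt ⊢; omega
  rw [show i = (i.toNat : Int) by omega]
  rw [PySem.List.pyGetD_natCast, PySem.List.pyGetD_natCast]
  rw [List.getD_eq_getElem _ _ hlt', List.getD_eq_getElem _ _ hlt]
  simp [List.getElem_dropLast]

-- ===== VERDICT (by name: the statements are the Claim_ definitions above) =====
theorem getStartEndIndex_spec : Claim_unchanged_getStartEndIndex := by
  intro a m_num _ hpre hnd
  -- m_num = x :: rest with rest ≠ []
  obtain ⟨x, rest, rfl⟩ : ∃ x rest, m_num = x :: rest := by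
    cases m_num with
    | nil => exact absurd rfl hpre
    | cons x rest => exact ⟨x, rest, rfl⟩
  have hrest : rest ≠ [] := by
    intro h; subst h; exact hnd (by simp [D_getStartEndIndex])
  unfold getStartEndIndex getStartEndIndex_alt
  simp only []
  -- rewrite A's range bound and index accesses to the dropLast list
  have hlen : ((x :: rest).length : Int) - 1 = (((x :: rest).dropLast).length : Int) := by
    simp
  rw [hlen]
  have hbody :
      (PySem.List.pyRange 1 (((x :: rest).dropLast.length : Int)) 1).foldl
        (fun (st : Int × List Int × List Int) i =>
          (st.1 + PySem.List.pyGetD (x :: rest) i 0,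
           st.2.1 ++ [st.1],
           st.2.2 ++ [st.1 + PySem.List.pyGetD (x :: rest) i 0]))
        (PySem.List.pyGetD (x :: rest) 0 0, [0], [PySem.List.pyGetD (x :: rest) 0 0])
      = (PySem.List.pyRange 1 (((x :: rest).dropLast.length : Int)) 1).foldl
        (fun (st : Int × List Int × List Int) i =>
          (st.1 + PySem.List.pyGetD (x :: rest).dropLast i 0,
           st.2.1 ++ [st.1],
           st.2.2 ++ [st.1 + PySem.List.pyGetD (x :: rest).dropLast i 0]))
        (PySem.List.pyGetD (x :: rest) 0 0, [0], [PySem.List.pyGetD (x :: rest) 0 0]) := by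
    apply PySem.List.foldl_congr_mem
    intro st i hi
    have hmem := (PySem.List.mem_pyRange_one).1 hi
    rw [pyGetD_dropLast (x :: rest) i (by omega) hmem.2]
  rw [hbody]
  rw [PySem.List.foldl_pyRange_pyGetD' (x :: rest).dropLast 0
        (fun (st : Int × List Int × List Int) y =>
          (st.1 + y, st.2.1 ++ [st.1], st.2.2 ++ [st.1 + y])) _ (by omega : (0:Int) ≤ 1)]
  -- dropLast of x :: rest, rest ≠ [], is x :: rest.dropLast; drop 1 is rest.dropLast
  have hdl : (x :: rest).dropLast = x :: rest.dropLast :=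
    List.dropLast_cons_of_ne_nil hrest
  rw [hdl]
  simp only [Int.toNat_one, List.drop_one, List.tail_cons]
  have hx0 : PySem.List.pyGetD (x :: rest) 0 0 = x := PySem.List.pyGetD_zero_cons _ _ _
  rw [hx0, a_fold_spec]
  -- B side: table = cumF 0 (x :: rest)
  have hb : (x :: rest).foldl (fun c x => c ++ [PySem.List.pyGetD c (-1) 0 + x]) [0]
      = cumF 0 (x :: rest) := by
    have := b_fold_eq_cumF (x :: rest) [] 0
    simpa using this
  have hc : cumF 0 (x :: rest) = 0 :: cumF x rest := by simp [cumF]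
  -- decompose rest = mid ++ [z]
  obtain ⟨mid, z, rfl⟩ : ∃ mid z, rest = mid ++ [z] := by
    rcases List.eq_nil_or_concat rest with h | ⟨mid, z, h⟩
    · exact absurd h hrest
    · exact ⟨mid, z, by simpa using h⟩
  have hmid : (mid ++ [z]).dropLast = mid := by simp
  have hcum : cumF x (mid ++ [z]) = cumF x mid ++ [x + mid.sum + z] :=
    cumF_append_singleton x mid z
  rw [hb, hc, hcum, hmid]
  rw [slice_one_neg_one, PySem.List.slice_to_neg_one]
  dsimp only
  rw [List.tail_cons]
  rw [List.dropLast_cons_of_ne_nil (by simp), List.dropLast_concat]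
  simp only [Prod.mk.injEq]
  refine ⟨?_, ?_⟩
  · -- start components
    conv_rhs => rw [cumF_eq_dropLast_append x mid]
    simp
  · -- end components
    conv_rhs => rw [cumF_head x mid]
    simp

theorem getStartEndIndex_changed : Claim_changed_getStartEndIndex := by
  unfold Claim_changed_getStartEndIndex; decide

theorem getStartEndIndex_tight : Claim_exact_getStartEndIndex := by
  intro a m_num _ _ hd
  obtain ⟨y, rfl⟩ : ∃ y, m_num = [y] := by
    cases m_num with
    | nil => simp [D_getStartEndIndex] at hd
    | cons y ys =>
      cases ys with
      | nil => exact ⟨y, rfl⟩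
      | cons z zs => simp [D_getStartEndIndex] at hd
  intro h
  -- A's first component has length 2, B's has length 1
  have hA : (getStartEndIndex a [y]).1 = [0, y] := by
    unfold getStartEndIndex
    rw [show (([y] : List Int).length : Int) - 1 = 0 by simp,
        PySem.List.pyRange_one_eq_nil (by omega)]
    simp [PySem.List.pyGetD_zero_cons]
  have hB : (getStartEndIndex_alt a [y]).1 = [0] := by
    unfold getStartEndIndex_alt
    have hb : ([y] : List Int).foldl (fun c x => c ++ [PySem.List.pyGetD c (-1) 0 + x]) [0]
        = cumF 0 [y] := by simpa using b_fold_eq_cumF [y] [] 0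
    dsimp only
    rw [hb, PySem.List.slice_to_neg_one]
    simp [cumF]
  have := congrArg (fun p : List Int × List Int => p.1.length) h
  simp only [hA, hB] at this
  simp at this
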